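-- pv_equiv track=rewrite | github.com/LanHikari22/delta-lab | foobar/find-the-access-codes/solution_alt.py | findLuckyTuples
-- ===== SOURCE A (Python) =====
-- def findLuckyTuples(l):
--     # instead of going O(n3) by searching all combinations, reframe `l` by mapping each element to the next
--     # possible lucky tuple element. This is an O(n2) operation. Then iterate over each element and build a lucky tuple.
--
--     # uncommented -- it seems uniqueness actually doesn't hold...
--     # since we seek unique pairs, any duplicates in sequence over size 3 (ex [1,1,1,1]) will cause a duplicate.
--     # perform an O(n1) operation to clear those to be of size 3 max.
--     # l = _filterDuplicatesInSeq(l, 3)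
--     n = len(l)
--
--     # each element will now point to its next possible lucky tuple elements. This is O(n2)
--     linked_l = _linkNextLuckyTuple(l)
--     assert(len(linked_l) == n)
--
--     # now we iterate over all links of depth 2 and capture all lucky tuples. this is O(n3) worst case still
--     res = []
--     for i in range(n):
--         for j in linked_l[i][1]:
--             for k in linked_l[j][1]:
--                 res.append((l[i], l[j], l[k]))
--
--     return res
--
-- def _linkNextLuckyTuple(l):
--     """
--     iterates all 2-size combinations (i,j) and created a linked list of indices for each possible next lucky tuple value
--     this is performed in O(n2) where n = len(l). [1, 1, 1] -> [(1, [1, 2]), (1, [2]), (1, [])]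
--     """
--     res = []
--     n = len(l)
--     for i in range(n):
--         res.append((l[i], []))
--         for j in range(i+1, n):
--             if l[j] % l[i] == 0:
--                 res[i][1].append(j)
--
--     return res
-- ===== SOURCE B (Python) =====
-- def findLuckyTuples(l):
--     n = len(l)
--     res = []
--     for i in range(n):
--         for j in range(i + 1, n):
--             if l[j] % l[i] == 0:
--                 for k in range(j + 1, n):
--                     if l[k] % l[j] == 0:
--                         res.append((l[i], l[j], l[k]))
--     return res
-- ===== Notes on version B (the rewrite author's own statement) =====
-- stated objective: simpler
-- what changed: Drops the _linkNextLuckyTuple adjacency-table pass entirely and enumerates triples with three nested index loops inline, testing divisibility directly instead of looking it up in a precomputed linked structure.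
import Mathlib
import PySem

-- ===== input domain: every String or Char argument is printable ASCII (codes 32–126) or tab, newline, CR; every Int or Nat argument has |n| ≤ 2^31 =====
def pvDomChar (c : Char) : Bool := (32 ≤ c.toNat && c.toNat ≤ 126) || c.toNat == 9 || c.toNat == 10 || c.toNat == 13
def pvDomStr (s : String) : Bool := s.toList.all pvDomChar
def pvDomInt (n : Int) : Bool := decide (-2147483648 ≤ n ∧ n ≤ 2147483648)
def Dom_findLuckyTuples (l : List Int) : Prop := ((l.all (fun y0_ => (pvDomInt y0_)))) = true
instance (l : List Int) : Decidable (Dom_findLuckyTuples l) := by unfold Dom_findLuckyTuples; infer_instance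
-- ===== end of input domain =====

-- B replaces A's precomputed adjacency-table pass with direct triple nested index loops (objective: simpler).


-- ===== PORT A =====
-- helper _linkNextLuckyTuple: for each i, pair l[i] with the list of indices j>i with l[j] % l[i] == 0
def linkNextLuckyTuple (l : List Int) : List (Int × List Int) :=
  (PySem.List.pyRange 0 (l.length : Int) 1).foldl (fun res i =>
    res ++ [(PySem.List.pyGetD l i 0,
      (PySem.List.pyRange (i + 1) (l.length : Int) 1).foldl (fun acc j =>
        if PySem.Int.mod (PySem.List.pyGetD l j 0) (PySem.List.pyGetD l i 0) == 0
        then acc ++ [j] else acc) [])]) []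

def findLuckyTuples (l : List Int) : List (Int × Int × Int) :=
  let linked := linkNextLuckyTuple l
  (PySem.List.pyRange 0 (l.length : Int) 1).foldl (fun res i =>
    (PySem.List.pyGetD linked i (0, [])).2.foldl (fun res j =>
      (PySem.List.pyGetD linked j (0, [])).2.foldl (fun res k =>
        res ++ [(PySem.List.pyGetD l i 0, PySem.List.pyGetD l j 0, PySem.List.pyGetD l k 0)]) res) res) []

-- ===== PORT B =====
def findLuckyTuples_alt (l : List Int) : List (Int × Int × Int) :=
  (PySem.List.pyRange 0 (l.length : Int) 1).foldl (fun res i =>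
    (PySem.List.pyRange (i + 1) (l.length : Int) 1).foldl (fun res j =>
      if PySem.Int.mod (PySem.List.pyGetD l j 0) (PySem.List.pyGetD l i 0) == 0 then
        (PySem.List.pyRange (j + 1) (l.length : Int) 1).foldl (fun res k =>
          if PySem.Int.mod (PySem.List.pyGetD l k 0) (PySem.List.pyGetD l j 0) == 0 then
            res ++ [(PySem.List.pyGetD l i 0, PySem.List.pyGetD l j 0, PySem.List.pyGetD l k 0)]
          else res) res
      else res) res) []

-- ===== PRECONDITION & SPEC =====
-- Pre_ excludes exactly the inputs where Python raises ZeroDivisionError: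
-- a zero element followed by at least one later element makes A (and B) compute l[j] % 0.
def Pre_findLuckyTuples (l : List Int) : Prop := ∀ x ∈ l.dropLast, x ≠ 0
instance (l : List Int) : Decidable (Pre_findLuckyTuples l) := by unfold Pre_findLuckyTuples; infer_instance

def pvWitness_findLuckyTuples : List Int := [1, 2, 4, 8]

def Spec_findLuckyTuples (l : List Int) (out : List (Int × Int × Int)) : Prop := out = findLuckyTuples_alt l
instance (l : List Int) (out : List (Int × Int × Int)) : Decidable (Spec_findLuckyTuples l out) := by unfold Spec_findLuckyTuples; infer_instance

-- ===== CLAIM (what is proved, stated in full; the proofs are below) =====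
def Claim_equal_findLuckyTuples : Prop := ∀ (l : List Int), Dom_findLuckyTuples l → Pre_findLuckyTuples l → Spec_findLuckyTuples l (findLuckyTuples l)

-- ===== LEMMAS AND PROOFS =====

-- the adjacency list A stores for index i, in closed form
def pvAdj (l : List Int) (i : Int) : List Int :=
  (PySem.List.pyRange (i + 1) (l.length : Int) 1).filter
    (fun j => PySem.Int.mod (PySem.List.pyGetD l j 0) (PySem.List.pyGetD l i 0) == 0)

theorem linkNext_eq (l : List Int) :
    linkNextLuckyTuple l =
      (PySem.List.pyRange 0 (l.length : Int) 1).map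
        (fun i => (PySem.List.pyGetD l i 0, pvAdj l i)) := by
  unfold linkNextLuckyTuple
  rw [PySem.List.foldl_append_singleton_eq_map]
  simp only [List.nil_append]
  refine List.map_congr_left (fun i _ => ?_)
  rw [PySem.List.foldl_append_if (f := fun (j : Int) => j)]
  simp [pvAdj]

theorem getD_linked (l : List Int) (j : Int) (h0 : 0 ≤ j) (h : j < (l.length : Int)) :
    PySem.List.pyGetD (linkNextLuckyTuple l) j (0, []) =
      (PySem.List.pyGetD l j 0, pvAdj l j) := by
  rw [linkNext_eq]
  exact PySem.List.pyGetD_map_pyRange_of_nonneg _ _ _ _ h0 h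

-- generic congruence for foldl when the step functions agree on members
theorem pvFoldl_congr_mem {α β : Type} (xs : List α) (f g : β → α → β) (init : β)
    (h : ∀ b, ∀ a ∈ xs, f b a = g b a) : xs.foldl f init = xs.foldl g init := by
  induction xs generalizing init with
  | nil => rfl
  | cons x xs ih =>
      simp only [List.foldl_cons]
      rw [h init x (List.mem_cons_self ..)]
      exact ih _ (fun b a ha => h b a (List.mem_cons_of_mem _ ha))

-- ===== VERDICT =====
theorem findLuckyTuples_spec : Claim_equal_findLuckyTuples := by
  intro l _ _
  unfold Spec_findLuckyTuples findLuckyTuples findLuckyTuples_alt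
  simp only []
  refine pvFoldl_congr_mem _ _ _ _ (fun res i hi => ?_)
  rw [PySem.List.mem_pyRange_one] at hi
  rw [getD_linked l i hi.1 hi.2]
  -- A's j-loop over the stored adjacency list = B's j-loop over the range with an inline test
  rw [show (pvAdj l i) = _ from rfl, pvAdj, List.foldl_filter]
  refine pvFoldl_congr_mem _ _ _ _ (fun res' j hj => ?_)
  rw [PySem.List.mem_pyRange_one] at hj
  by_cases hdiv : PySem.Int.mod (PySem.List.pyGetD l j 0) (PySem.List.pyGetD l i 0) == 0
  · simp only [hdiv, if_pos]
    rw [getD_linked l j (by omega) hj.2]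
    -- both k-loops append the same filtered, mapped triples
    rw [show (pvAdj l j) = _ from rfl, pvAdj, List.foldl_filter]
  · simp [hdiv]
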